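-- pv_equiv track=rewrite | github.com/dqgthb/algorithms | 1110/main.py | solve
-- ===== SOURCE A (Python) =====
-- def fstsnd(n):
--     assert 0 <= n <= 99
--     strn: str = str(n)
--     if len(strn) == 1:
--         return 0, int(strn)
--     return (int(i) for i in strn)
--
-- def solve(a: int):
--     i: int = 0
--     encountered = {}
--     while True:
--         fst, snd = fstsnd(a)
--         sum_ = int(str(snd) + str((fst + snd) % 10))
--         if sum_ in encountered:
--             return i - encountered[sum_]
--         else:
--             encountered[sum_] = i
--             i += 1
--             a = sum_
-- ===== SOURCE B (Python) =====
-- def step(x):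
--     assert 0 <= x <= 99
--     fst, snd = divmod(x, 10)
--     return int(str(snd) + str((fst + snd) % 10))
--
-- def solve(a: int):
--     # Floyd tortoise-and-hare on the digit-sequence transition; returns the cycle length
--     slow = step(a)
--     fast = step(step(a))
--     while slow != fast:
--         slow = step(slow)
--         fast = step(step(fast))
--     n = 1
--     x = step(slow)
--     while x != slow:
--         x = step(x)
--         n += 1
--     return n
-- ===== Notes on version B (the rewrite author's own statement) =====
-- stated objective: alternative
-- what changed: Replaces A's visited-dictionary (hash map from state to index, returning i - encountered[sum]) with Floyd's tortoise-and-hare cycle detection followed by a single walk around the cycle to count its length, using O(1) extra space.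
import Mathlib
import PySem

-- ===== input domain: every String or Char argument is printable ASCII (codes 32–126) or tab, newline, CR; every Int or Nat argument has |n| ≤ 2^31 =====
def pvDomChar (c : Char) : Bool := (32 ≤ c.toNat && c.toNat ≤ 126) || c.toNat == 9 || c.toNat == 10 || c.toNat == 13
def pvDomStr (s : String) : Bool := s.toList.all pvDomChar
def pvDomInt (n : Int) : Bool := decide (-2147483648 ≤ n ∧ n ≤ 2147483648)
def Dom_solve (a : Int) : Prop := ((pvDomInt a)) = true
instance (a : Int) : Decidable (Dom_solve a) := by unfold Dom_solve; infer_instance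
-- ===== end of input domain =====

-- B replaces A's visited-dictionary with Floyd's tortoise-and-hare cycle detection (objective: alternative, O(1) extra space).

-- ===== PORT A =====
-- fstsnd: Python asserts 0<=n<=99 (outside → excluded by Pre_); returns the digit pair of n
def fstsnd (n : Int) : Int × Int :=
  let strn := PySem.Int.toChars n
  if strn.length = 1 then (0, n)
  else ((PySem.Int.ofChars? [strn.getD 0 '0']).getD 0,
        (PySem.Int.ofChars? [strn.getD 1 '0']).getD 0)

-- the 'while True' loop of A, with fuel (fuel only makes it total; under Pre_ at most 101 iterations run)
def solveLoop : Nat → Int → Int → PySem.Dict Int Int → Int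
  | 0, _, _, _ => 0
  | fuel + 1, i, a, encountered =>
    let p := fstsnd a
    let fst := p.1
    let snd := p.2
    let sum_ := (PySem.Int.ofChars? (PySem.Int.toChars snd ++ PySem.Int.toChars (PySem.Int.mod (fst + snd) 10))).getD 0
    match encountered.get? sum_ with
    | some j => i - j
    | none => solveLoop fuel (i + 1) sum_ (encountered.insert sum_ i)

def solve (a : Int) : Int := solveLoop 202 0 a (PySem.Dict.empty)

-- ===== PORT B =====
def stepB (x : Int) : Int :=
  let p := (PySem.Int.divmod? x 10).getD (0, 0)
  let fst := p.1
  let snd := p.2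
  (PySem.Int.ofChars? (PySem.Int.toChars snd ++ PySem.Int.toChars (PySem.Int.mod (fst + snd) 10))).getD 0

-- 'while slow != fast' phase, with fuel (totality only)
def meetLoop : Nat → Int → Int → Int
  | 0, slow, _ => slow
  | fuel + 1, slow, fast =>
    if slow = fast then slow
    else meetLoop fuel (stepB slow) (stepB (stepB fast))

-- 'while x != slow' counting phase, with fuel (totality only)
def countLoop : Nat → Int → Int → Int → Int
  | 0, _, _, n => n
  | fuel + 1, x, slow, n =>
    if x = slow then n
    else countLoop fuel (stepB x) slow (n + 1)

def solve_alt (a : Int) : Int :=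
  let slow := stepB a
  let fast := stepB (stepB a)
  let m := meetLoop 300 slow fast
  countLoop 300 (stepB m) m 1

-- ===== PRECONDITION & SPEC =====
-- Pre_: A's fstsnd asserts 0 <= a <= 99 (AssertionError outside); this is exactly A's returning domain
def Pre_solve (a : Int) : Prop := 0 ≤ a ∧ a ≤ 99
instance (a : Int) : Decidable (Pre_solve a) := by unfold Pre_solve; infer_instance
def pvWitness_solve : Int := 7

def Spec_solve (a : Int) (out : Int) : Prop := out = solve_alt a
instance (a : Int) (out : Int) : Decidable (Spec_solve a out) := by unfold Spec_solve; infer_instance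

-- ===== CLAIM (what is proved, stated in full; the proofs are below) =====
def Claim_equal_solve : Prop := ∀ (a : Int), Dom_solve a → Pre_solve a → Spec_solve a (solve a)

-- ===== LEMMAS AND PROOFS =====

-- numeric shadow of the string-built transition: step(x) = 10*(x%10) + ((x//10 + x%10) % 10)
def stepN (x : Int) : Int :=
  10 * PySem.Int.mod x 10 + PySem.Int.mod (PySem.Int.floordiv x 10 + PySem.Int.mod x 10) 10

def solveLoopN : Nat → Int → Int → PySem.Dict Int Int → Int
  | 0, _, _, _ => 0
  | fuel + 1, i, a, enc =>
    let sum_ := stepN a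
    match enc.get? sum_ with
    | some j => i - j
    | none => solveLoopN fuel (i + 1) sum_ (enc.insert sum_ i)

def meetLoopN : Nat → Int → Int → Int
  | 0, slow, _ => slow
  | fuel + 1, slow, fast => if slow = fast then slow else meetLoopN fuel (stepN slow) (stepN (stepN fast))

def countLoopN : Nat → Int → Int → Int → Int
  | 0, _, _, n => n
  | fuel + 1, x, slow, n => if x = slow then n else countLoopN fuel (stepN x) slow (n + 1)

def altN (a : Int) : Int :=
  let m := meetLoopN 300 (stepN a) (stepN (stepN a))
  countLoopN 300 (stepN m) m 1

lemma stepN_bounds (x : Int) (h1 : 0 ≤ x) (h2 : x ≤ 99) : 0 ≤ stepN x ∧ stepN x ≤ 99 := by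
  unfold stepN
  simp only [PySem.Int.mod_eq_emod_of_pos (show (0:Int) < 10 by norm_num),
    PySem.Int.floordiv_eq_ediv_of_pos (show (0:Int) < 10 by norm_num)]
  omega

set_option maxHeartbeats 1000000 in
set_option maxRecDepth 10000 in
lemma bodyA_eq_nat : ∀ n ∈ List.range 100,
    (PySem.Int.ofChars? (PySem.Int.toChars (fstsnd (n : Int)).2 ++
      PySem.Int.toChars (PySem.Int.mod ((fstsnd (n : Int)).1 + (fstsnd (n : Int)).2) 10))).getD 0
      = stepN (n : Int) := by decide

lemma bodyA_eq (a : Int) (h1 : 0 ≤ a) (h2 : a ≤ 99) :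
    (PySem.Int.ofChars? (PySem.Int.toChars (fstsnd a).2 ++
      PySem.Int.toChars (PySem.Int.mod ((fstsnd a).1 + (fstsnd a).2) 10))).getD 0 = stepN a := by
  have h := bodyA_eq_nat a.toNat (by simp only [List.mem_range]; omega)
  rwa [Int.toNat_of_nonneg h1] at h

set_option maxHeartbeats 1000000 in
set_option maxRecDepth 10000 in
lemma stepB_eq_nat : ∀ n ∈ List.range 100, stepB (n : Int) = stepN (n : Int) := by decide

lemma stepB_eq (a : Int) (h1 : 0 ≤ a) (h2 : a ≤ 99) : stepB a = stepN a := by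
  have h := stepB_eq_nat a.toNat (by simp only [List.mem_range]; omega)
  rwa [Int.toNat_of_nonneg h1] at h

lemma solveLoop_eq (fuel : Nat) : ∀ (i a : Int) (enc : PySem.Dict Int Int),
    0 ≤ a → a ≤ 99 → solveLoop fuel i a enc = solveLoopN fuel i a enc := by
  induction fuel with
  | zero => intro i a enc _ _; rfl
  | succ f ih =>
    intro i a enc h1 h2
    show (match enc.get? ((PySem.Int.ofChars? (PySem.Int.toChars (fstsnd a).2 ++
            PySem.Int.toChars (PySem.Int.mod ((fstsnd a).1 + (fstsnd a).2) 10))).getD 0) with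
          | some j => i - j
          | none => solveLoop f (i + 1) _ (enc.insert _ i)) = _
    rw [bodyA_eq a h1 h2]
    show (match enc.get? (stepN a) with
          | some j => i - j
          | none => solveLoop f (i + 1) (stepN a) (enc.insert (stepN a) i))
        = (match enc.get? (stepN a) with
          | some j => i - j
          | none => solveLoopN f (i + 1) (stepN a) (enc.insert (stepN a) i))
    obtain ⟨b1, b2⟩ := stepN_bounds a h1 h2
    cases h : enc.get? (stepN a) with
    | some j => rfl
    | none => exact ih (i + 1) (stepN a) (enc.insert (stepN a) i) b1 b2

lemma meetLoop_eq (fuel : Nat) : ∀ (slow fast : Int),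
    0 ≤ slow → slow ≤ 99 → 0 ≤ fast → fast ≤ 99 →
    meetLoop fuel slow fast = meetLoopN fuel slow fast := by
  induction fuel with
  | zero => intro slow fast _ _ _ _; rfl
  | succ f ih =>
    intro slow fast hs1 hs2 hf1 hf2
    show (if slow = fast then slow else meetLoop f (stepB slow) (stepB (stepB fast)))
          = (if slow = fast then slow else meetLoopN f (stepN slow) (stepN (stepN fast)))
    split_ifs with h
    · rfl
    · obtain ⟨c1, c2⟩ := stepN_bounds slow hs1 hs2
      obtain ⟨d1, d2⟩ := stepN_bounds fast hf1 hf2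
      obtain ⟨e1, e2⟩ := stepN_bounds _ d1 d2
      rw [stepB_eq slow hs1 hs2, stepB_eq fast hf1 hf2, stepB_eq _ d1 d2]
      exact ih _ _ c1 c2 e1 e2

lemma meetLoopN_bounds (fuel : Nat) : ∀ (slow fast : Int), 0 ≤ slow → slow ≤ 99 →
    0 ≤ meetLoopN fuel slow fast ∧ meetLoopN fuel slow fast ≤ 99 := by
  induction fuel with
  | zero => intro slow fast h1 h2; exact ⟨h1, h2⟩
  | succ f ih =>
    intro slow fast h1 h2
    show (0 ≤ if slow = fast then slow else meetLoopN f (stepN slow) (stepN (stepN fast))) ∧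
         ((if slow = fast then slow else meetLoopN f (stepN slow) (stepN (stepN fast))) ≤ 99)
    split_ifs with h
    · exact ⟨h1, h2⟩
    · obtain ⟨c1, c2⟩ := stepN_bounds slow h1 h2
      exact ih _ _ c1 c2

lemma countLoop_eq (fuel : Nat) : ∀ (x slow n : Int), 0 ≤ x → x ≤ 99 →
    countLoop fuel x slow n = countLoopN fuel x slow n := by
  induction fuel with
  | zero => intro x slow n _ _; rfl
  | succ f ih =>
    intro x slow n h1 h2
    show (if x = slow then n else countLoop f (stepB x) slow (n + 1))
          = (if x = slow then n else countLoopN f (stepN x) slow (n + 1))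
    split_ifs with h
    · rfl
    · obtain ⟨c1, c2⟩ := stepN_bounds x h1 h2
      rw [stepB_eq x h1 h2]
      exact ih _ _ _ c1 c2

lemma solve_alt_eq_altN (a : Int) (h1 : 0 ≤ a) (h2 : a ≤ 99) : solve_alt a = altN a := by
  obtain ⟨s1, s2⟩ := stepN_bounds a h1 h2
  obtain ⟨t1, t2⟩ := stepN_bounds _ s1 s2
  obtain ⟨m1, m2⟩ := meetLoopN_bounds 300 (stepN a) (stepN (stepN a)) s1 s2
  obtain ⟨u1, u2⟩ := stepN_bounds _ m1 m2
  show countLoop 300 (stepB (meetLoop 300 (stepB a) (stepB (stepB a))))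
        (meetLoop 300 (stepB a) (stepB (stepB a))) 1 = altN a
  rw [stepB_eq a h1 h2, stepB_eq _ s1 s2,
      meetLoop_eq 300 (stepN a) (stepN (stepN a)) s1 s2 t1 t2,
      stepB_eq _ m1 m2, countLoop_eq 300 _ _ 1 u1 u2]
  rfl

set_option maxHeartbeats 8000000 in
set_option maxRecDepth 100000 in
lemma numeric_eq : ∀ n ∈ List.range 100,
    solveLoopN 202 0 (n : Int) PySem.Dict.empty = altN (n : Int) := by decide

-- ===== VERDICT (by name: the statement is the Claim_ definition above) =====
theorem solve_spec : Claim_equal_solve := by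
  intro a _ hpre
  obtain ⟨h1, h2⟩ := hpre
  unfold Spec_solve
  have hn := numeric_eq a.toNat (by simp only [List.mem_range]; omega)
  rw [Int.toNat_of_nonneg h1] at hn
  calc solve a = solveLoopN 202 0 a PySem.Dict.empty := solveLoop_eq 202 0 a _ h1 h2
    _ = altN a := hn
    _ = solve_alt a := (solve_alt_eq_altN a h1 h2).symm
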